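-- pv_equiv track=rewrite | github.com/Carrotww/Carrotww | None_Tech/22_09/2020_09_21_programmers_괄호 변환_hyeong(solo).py | change_correct
-- ===== SOURCE A (Python) =====
-- from collections import deque
--
-- def check_correct(string):
--     stack = []
--     for st in string:
--         if st == '(':
--             stack.append(st)
--         else:
--             if not stack: return False
--             stack.pop()
--     if stack: return False
--     else: return True
--
-- def check_uv(string):
--     queue = deque(string)
--     left, right = 0, 0
--     u, v = '', ''
--     while queue:
--         char = queue.popleft()
--         u += char
--         if char == '(':
--             left += 1
--         else:
--             right += 1
--         if left == right:
--             break
--     v = ''.join(list(queue))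
--     return u, v
--
-- def change_correct(string):
--     if string == '':
--         return ''
--     u, v = check_uv(string)
--     if check_correct(u):
--         return u + change_correct(v)
--     else:
--         return '(' + change_correct(v) + ')' + ''.join(list(map(lambda x:'(' if x==')' else ')', u[1:-1])))
-- ===== SOURCE B (Python) =====
-- def change_correct(string):
--     # One pass over the string with a balance counter: split into minimal
--     # balanced chunks by index, assemble prefix parts and reversed suffix
--     # parts with join (iterative, no recursion, no deque, no stack).
--     pre, post = [], []
--     i, n = 0, len(string)
--     while i < n:
--         bal = 0
--         j = i
--         while j < n:
--             bal += 1 if string[j] == '(' else -1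
--             j += 1
--             if bal == 0:
--                 break
--         u = string[i:j]
--         if bal == 0 and u[0] == '(':
--             pre.append(u)
--         else:
--             pre.append('(')
--             post.append(')' + ''.join('(' if c == ')' else ')' for c in u[1:-1]))
--         i = j
--     return ''.join(pre) + ''.join(reversed(post))
-- ===== Notes on version B (the rewrite author's own statement) =====
-- stated objective: faster
-- what changed: Replaced A's recursion with deque-splitting, a separate stack-based correctness pass and repeated string concatenation by one iterative index/balance-counter loop that slices minimal balanced chunks, tests correctness from the chunk's first character and final balance, and assembles the result with two joins.
import Mathlib
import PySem

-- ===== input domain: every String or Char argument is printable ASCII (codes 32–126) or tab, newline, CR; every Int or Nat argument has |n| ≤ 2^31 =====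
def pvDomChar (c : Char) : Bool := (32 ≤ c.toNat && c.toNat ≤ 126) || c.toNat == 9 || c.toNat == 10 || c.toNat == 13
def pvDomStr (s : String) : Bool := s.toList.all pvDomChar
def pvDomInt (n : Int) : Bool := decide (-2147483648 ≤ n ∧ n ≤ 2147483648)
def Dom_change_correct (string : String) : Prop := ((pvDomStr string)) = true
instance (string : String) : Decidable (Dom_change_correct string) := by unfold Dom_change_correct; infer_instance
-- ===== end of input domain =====

-- B replaces A's quadratic recursion (deque + repeated stack check + string concatenation)
-- by one iterative balance-counter pass that splits minimal balanced chunks and joins the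
-- pieces at the end; objective: faster (measured).

-- ===== PORT A =====
-- check_correct's loop: the stack is a list, append = ++ [c], pop = dropLast
def checkGoA : List Char → List Char → Bool
  | stack, [] => stack.isEmpty
  | stack, c :: t =>
    if c = '(' then checkGoA (stack ++ [c]) t
    else if stack.isEmpty then false else checkGoA stack.dropLast t

def checkCorrectA (l : List Char) : Bool := checkGoA [] l

-- check_uv's while loop over the deque (left/right are Python ints)
def checkUvGoA : List Char → Int → Int → List Char → List Char × List Char
  | [], _, _, u => (u, [])
  | c :: q, left, right, u =>
    let u' := u ++ [c]
    let left' := if c = '(' then left + 1 else left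
    let right' := if c = '(' then right else right + 1
    if left' = right' then (u', q) else checkUvGoA q left' right' u'

-- termination helper for changeListA (cited by name in decreasing_by)
theorem checkUvGoA_snd_lt : ∀ (q : List Char) (left right : Int) (u : List Char),
    q ≠ [] → (checkUvGoA q left right u).2.length < q.length := by
  intro q
  induction q with
  | nil => intro _ _ _ h; exact absurd rfl h
  | cons c q' ih =>
    intro left right u _
    show (if (if c = '(' then left + 1 else left) = (if c = '(' then right else right + 1)
        then (u ++ [c], q')
        else checkUvGoA q' (if c = '(' then left + 1 else left) (if c = '(' then right else right + 1) (u ++ [c])).2.length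
      < (c :: q').length
    by_cases hz : (if c = '(' then left + 1 else left) = (if c = '(' then right else right + 1)
    · rw [if_pos hz]; simp
    · rw [if_neg hz]
      cases q' with
      | nil => simp [checkUvGoA]
      | cons c2 q2 => exact Nat.lt_trans (ih _ _ _ (by simp)) (by simp)

-- change_correct's recursion; u[1:-1] is (drop 1).dropLast (exact for every length)
def changeListA (l : List Char) : List Char :=
  if _h : l = [] then []
  else
    let uv := checkUvGoA l 0 0 []
    if checkCorrectA uv.1 then uv.1 ++ changeListA uv.2
    else '(' :: changeListA uv.2 ++ ')' :: (uv.1.drop 1).dropLast.map (fun c => if c = ')' then '(' else ')')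
termination_by l.length
decreasing_by all_goals exact checkUvGoA_snd_lt l 0 0 [] _h

def change_correct (string : String) : String := String.mk (changeListA string.toList)

-- ===== PORT B =====
-- Source B's inner scan: advance the balance counter and index until bal == 0 or the end
def scanB : List Char → Int → Nat → Int × Nat
  | [], bal, k => (bal, k)
  | c :: t, bal, k =>
    let bal' := bal + (if c = '(' then (1 : Int) else -1)
    if bal' = 0 then (bal', k + 1) else scanB t bal' (k + 1)

-- termination helper for goB (cited by name in decreasing_by)
theorem scanB_cons_eq (c : Char) (t : List Char) (b : Int) (k : Nat) :
    scanB (c :: t) b k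
      = if b + (if c = '(' then (1 : Int) else -1) = 0
        then (b + (if c = '(' then (1 : Int) else -1), k + 1)
        else scanB t (b + (if c = '(' then (1 : Int) else -1)) (k + 1) := rfl

theorem scanB_k_pos : ∀ (l : List Char) (b : Int) (k : Nat), l ≠ [] → k < (scanB l b k).2 := by
  intro l
  induction l with
  | nil => intro _ _ h; exact absurd rfl h
  | cons c t ih =>
    intro b k _
    rw [scanB_cons_eq]
    by_cases hz : b + (if c = '(' then (1 : Int) else -1) = 0
    · rw [if_pos hz]; exact Nat.lt_succ_self k
    · rw [if_neg hz]
      cases t with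
      | nil => exact Nat.lt_succ_self k
      | cons c2 t2 => exact Nat.lt_trans (Nat.lt_succ_self k) (ih _ (k+1) (by simp))

-- Source B's outer while loop: rest = string[i:], u = rest[:k]; pre/post collect the pieces
def goB (rest : List Char) (pre post : List (List Char)) : List Char :=
  if _h : rest = [] then pre.flatten ++ post.reverse.flatten
  else
    let p := scanB rest 0 0
    let u := rest.take p.2
    if p.1 = 0 ∧ u.head? = some '(' then
      goB (rest.drop p.2) (pre ++ [u]) post
    else
      goB (rest.drop p.2) (pre ++ [['(']])
        (post ++ [')' :: (u.drop 1).dropLast.map (fun c => if c = ')' then '(' else ')')])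
termination_by rest.length
decreasing_by all_goals
  have h1 := scanB_k_pos rest 0 0 _h
  have h2 : 0 < rest.length := List.length_pos_iff.mpr _h
  simp only [List.length_drop]; omega

def change_correct_alt (string : String) : String := String.mk (goB string.toList [] [])

-- ===== PRECONDITION & SPEC =====
def Spec_change_correct (string : String) (out : String) : Prop := out = change_correct_alt string
instance (string : String) (out : String) : Decidable (Spec_change_correct string out) := by unfold Spec_change_correct; infer_instance

-- ===== CLAIM (what is proved, stated in full; the proofs are below) =====
def Claim_equal_change_correct : Prop := ∀ (string : String), Dom_change_correct string → Spec_change_correct string (change_correct string)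

-- ===== LEMMAS AND PROOFS =====

-- running balance of a chunk
def balInt : List Char → Int
  | [] => 0
  | c :: t => (if c = '(' then (1 : Int) else -1) + balInt t

theorem scanB_k_le : ∀ (l : List Char) (b : Int) (k : Nat), (scanB l b k).2 ≤ k + l.length := by
  intro l
  induction l with
  | nil => intro b k; simp [scanB]
  | cons c t ih =>
    intro b k
    rw [scanB_cons_eq]
    by_cases hz : b + (if c = '(' then (1 : Int) else -1) = 0
    · rw [if_pos hz]; simp
    · rw [if_neg hz]
      have := ih (b + (if c = '(' then (1 : Int) else -1)) (k+1)
      simp only [List.length_cons]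
      omega

theorem scanB_k_ge : ∀ (l : List Char) (b : Int) (k : Nat), k ≤ (scanB l b k).2 := by
  intro l
  induction l with
  | nil => intro b k; simp [scanB]
  | cons c t ih =>
    intro b k
    rw [scanB_cons_eq]
    by_cases hz : b + (if c = '(' then (1 : Int) else -1) = 0
    · rw [if_pos hz]; exact Nat.le_succ k
    · rw [if_neg hz]; exact Nat.le_trans (Nat.le_succ k) (ih _ (k+1))

theorem scanB_shift_snd : ∀ (l : List Char) (b : Int) (k : Nat),
    (scanB l b k).2 = k + (scanB l b 0).2 := by
  intro l
  induction l with
  | nil => intro b k; simp [scanB]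
  | cons c t ih =>
    intro b k
    rw [scanB_cons_eq c t b k, scanB_cons_eq c t b 0]
    by_cases hz : b + (if c = '(' then (1 : Int) else -1) = 0
    · rw [if_pos hz, if_pos hz]
    · rw [if_neg hz, if_neg hz, ih _ (k+1), ih _ 1]
      omega

theorem balInt_cons (c : Char) (t : List Char) :
    balInt (c :: t) = (if c = '(' then (1 : Int) else -1) + balInt t := rfl

theorem scanB_bal : ∀ (l : List Char) (b : Int) (k : Nat),
    (scanB l b k).1 = b + balInt (l.take ((scanB l b k).2 - k)) := by
  intro l
  induction l with
  | nil => intro b k; simp [scanB, balInt]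
  | cons c t ih =>
    intro b k
    rw [scanB_cons_eq]
    by_cases hz : b + (if c = '(' then (1 : Int) else -1) = 0
    · rw [if_pos hz]
      show b + _ = b + balInt ((c :: t).take (k + 1 - k))
      rw [Nat.add_sub_cancel_left, List.take_succ_cons, List.take_zero, balInt_cons]
      simp [balInt]
    · rw [if_neg hz]
      have hge := scanB_k_ge t (b + (if c = '(' then (1 : Int) else -1)) (k+1)
      have hm : (scanB t (b + (if c = '(' then (1 : Int) else -1)) (k+1)).2 - k
          = ((scanB t (b + (if c = '(' then (1 : Int) else -1)) (k+1)).2 - (k+1)) + 1 := by omega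
      rw [hm, List.take_succ_cons, balInt_cons, ih _ (k+1)]
      ring

theorem scanB_first : ∀ (l : List Char) (b : Int) (k : Nat) (j : Nat),
    1 ≤ j → j < (scanB l b k).2 - k → b + balInt (l.take j) ≠ 0 := by
  intro l
  induction l with
  | nil =>
    intro b k j h1 h2
    simp [scanB] at h2
  | cons c t ih =>
    intro b k j h1 h2
    rw [scanB_cons_eq] at h2
    obtain ⟨i, rfl⟩ : ∃ i, j = i + 1 := ⟨j - 1, by omega⟩
    by_cases hz : b + (if c = '(' then (1 : Int) else -1) = 0
    · rw [if_pos hz] at h2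
      have h2' : i + 1 < k + 1 - k := h2
      exact absurd h2' (by omega)
    · rw [if_neg hz] at h2
      have hge := scanB_k_ge t (b + (if c = '(' then (1 : Int) else -1)) (k+1)
      by_cases hi : i = 0
      · subst hi
        rw [List.take_succ_cons, List.take_zero, balInt_cons]
        simpa [balInt] using hz
      · rw [List.take_succ_cons, balInt_cons, ← Int.add_assoc]
        exact ih (b + (if c = '(' then (1 : Int) else -1)) (k+1) i (by omega) (by omega)

-- check_correct's stack loop only uses the stack's length
def counterCheck : Nat → List Char → Bool
  | n, [] => n == 0
  | n, c :: t => if c = '(' then counterCheck (n+1) t else if n = 0 then false else counterCheck (n-1) t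

theorem checkGoA_counter : ∀ (l s : List Char), checkGoA s l = counterCheck s.length l := by
  intro l
  induction l with
  | nil => intro s; cases s <;> simp [checkGoA, counterCheck]
  | cons c t ih =>
    intro s
    simp only [checkGoA, counterCheck]
    split
    · rw [ih]; simp
    · rcases List.eq_nil_or_concat' s with h | ⟨s', x, h⟩
      · subst h; simp
      · subst h
        have : ¬ (s' ++ [x]).isEmpty := by simp
        rw [if_neg this, ih]
        simp

theorem counterCheck_true_bal : ∀ (l : List Char) (n : Nat),
    counterCheck n l = true → (n : Int) + balInt l = 0 := by
  intro l
  induction l with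
  | nil => intro n h; simp [counterCheck] at h; simp [h, balInt]
  | cons c t ih =>
    intro n h
    simp only [counterCheck] at h
    split at h
    · have := ih (n+1) h
      rename_i hc
      simp [balInt, hc]; push_cast at this ⊢; omega
    · split at h
      · exact absurd h (by simp)
      · rename_i hc hn
        have := ih (n-1) h
        have hn1 : 1 ≤ n := by omega
        simp [balInt, hc]
        push_cast [hn1] at this ⊢
        omega

theorem counterCheck_true_of : ∀ (l : List Char) (n : Nat), 1 ≤ n →
    (∀ j, 1 ≤ j → j < l.length → (n : Int) + balInt (l.take j) ≠ 0) →
    (n : Int) + balInt l = 0 → counterCheck n l = true := by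
  intro l
  induction l with
  | nil => intro n h1 _ h3; simp [balInt] at h3; omega
  | cons c t ih =>
    intro n h1 h2 h3
    simp only [counterCheck]
    by_cases hc : c = '('
    · rw [if_pos hc]
      refine ih (n+1) (by omega) ?_ ?_
      · intro j hj1 hj2
        have := h2 (j+1) (by omega) (by simp; omega)
        rw [List.take_succ_cons, balInt, hc] at this
        push_cast at this ⊢; omega
      · rw [balInt, hc] at h3; push_cast at h3 ⊢; omega
    · rw [if_neg hc]
      have hbc : balInt (c :: t) = -1 + balInt t := by simp [balInt, hc]
      rcases List.eq_nil_or_concat' t with ht | ⟨t', x, ht⟩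
      · subst ht
        have : n = 1 := by simp [balInt, hc] at h3; omega
        simp [this, counterCheck]
      · have htne : t ≠ [] := by subst ht; simp
        have hn2 : 2 ≤ n := by
          by_contra hlt
          have hn1 : n = 1 := by omega
          have := h2 1 (by omega) (by simp [List.length_pos_iff.mpr htne])
          simp [List.take_succ_cons, balInt, hc, hn1] at this
        rw [if_neg (by omega)]
        refine ih (n-1) (by omega) ?_ ?_
        · intro j hj1 hj2
          have := h2 (j+1) (by omega) (by simp; omega)
          rw [List.take_succ_cons, balInt] at this
          rw [if_neg hc] at this
          push_cast [Nat.le_of_succ_le hn2] at this ⊢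
          omega
        · rw [hbc] at h3; push_cast [Nat.le_of_succ_le hn2] at h3 ⊢; omega

-- check_uv computes exactly the split point that scanB finds
theorem checkUvGoA_cons_eq (c : Char) (q : List Char) (left right : Int) (u : List Char) :
    checkUvGoA (c :: q) left right u
      = if (if c = '(' then left + 1 else left) = (if c = '(' then right else right + 1)
        then (u ++ [c], q)
        else checkUvGoA q (if c = '(' then left + 1 else left) (if c = '(' then right else right + 1) (u ++ [c]) := rfl

theorem checkUvGoA_scan : ∀ (q : List Char) (left right : Int) (u : List Char),
    checkUvGoA q left right u
      = (u ++ q.take ((scanB q (left - right) 0).2), q.drop ((scanB q (left - right) 0).2)) := by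
  intro q
  induction q with
  | nil => intro left right u; simp [checkUvGoA, scanB]
  | cons c q' ih =>
    intro left right u
    rw [checkUvGoA_cons_eq, scanB_cons_eq]
    have hd : ((if c = '(' then left + 1 else left) - if c = '(' then right else right + 1)
        = (left - right) + (if c = '(' then (1 : Int) else -1) := by
      by_cases hc : c = '(' <;> simp [hc] <;> ring
    by_cases hz : (left - right) + (if c = '(' then (1 : Int) else -1) = 0
    · rw [if_pos (by omega), if_pos hz]
      simp
    · rw [if_neg (by omega), if_neg hz, ih, hd, scanB_shift_snd q' _ 1]
      have h1 : (1 : Nat) + (scanB q' ((left - right) + (if c = '(' then (1 : Int) else -1)) 0).2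
          = (scanB q' ((left - right) + (if c = '(' then (1 : Int) else -1)) 0).2 + 1 := Nat.add_comm _ _
      rw [h1, List.take_succ_cons, List.drop_succ_cons]
      simp [List.append_assoc]

-- correctness test of the minimal chunk u: u is balanced (the scan broke) and starts with '('
theorem checkCorrectA_iff (l : List Char) (hl : l ≠ []) :
    checkCorrectA (l.take (scanB l 0 0).2) = true
      ↔ ((scanB l 0 0).1 = 0 ∧ (l.take (scanB l 0 0).2).head? = some '(') := by
  set k := (scanB l 0 0).2 with hk
  have hk1 : 1 ≤ k := scanB_k_pos l 0 0 hl
  have hkle : k ≤ l.length := by have := scanB_k_le l 0 0; omega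
  have hbal : (scanB l 0 0).1 = balInt (l.take k) := by
    have := scanB_bal l 0 0; simpa using this
  have hulen : (l.take k).length = k := by simp [List.length_take]; omega
  have hune : l.take k ≠ [] := by
    intro h; rw [h] at hulen; simp at hulen; omega
  rcases List.exists_cons_of_ne_nil hune with ⟨c, t, hct⟩
  rw [checkCorrectA, checkGoA_counter]
  constructor
  · intro h
    have hb := counterCheck_true_bal _ 0 (by simpa using h)
    simp at hb
    refine ⟨by rw [hbal, hb], ?_⟩
    rw [hct]
    by_cases hc : c = '('
    · simp [hc]
    · rw [hct] at h
      simp [counterCheck, hc] at h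
  · rintro ⟨hb0, hh⟩
    rw [hct] at hh
    simp at hh
    subst hh
    rw [hct]
    simp only [counterCheck]
    have hblu : balInt (l.take k) = 0 := by rw [← hbal, hb0]
    have htlen : t.length = k - 1 := by rw [hct] at hulen; simp at hulen; omega
    refine counterCheck_true_of t 1 (by omega) ?_ ?_
    · intro j hj1 hj2
      have hjk : j + 1 < k := by omega
      have htake : ('(' :: t).take (j+1) = l.take (j+1) := by
        rw [← hct, List.take_take, Nat.min_eq_left (by omega)]
      have := scanB_first l 0 0 (j+1) (by omega) (by omega)
      rw [← htake] at this
      simp only [List.take_succ_cons, balInt] at this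
      simpa using this
    · rw [hct] at hblu
      simp [balInt] at hblu
      omega

-- the iterative loop equals pre-join ++ A's recursion ++ reversed-post-join
theorem goB_eq_aux : ∀ (n : Nat) (rest : List Char), rest.length ≤ n → ∀ (pre post : List (List Char)),
    goB rest pre post = pre.flatten ++ changeListA rest ++ post.reverse.flatten := by
  intro n
  induction n with
  | zero =>
    intro rest hlen pre post
    have : rest = [] := by cases rest <;> simp_all
    subst this
    rw [goB, changeListA]
    simp
  | succ m ih =>
    intro rest hlen pre post
    by_cases hr : rest = []
    · subst hr; rw [goB, changeListA]; simp
    · rw [goB, dif_neg hr, changeListA, dif_neg hr]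
      have huv := checkUvGoA_scan rest 0 0 []
      simp only [show (0:Int) - 0 = 0 by ring, List.nil_append] at huv
      set k := (scanB rest 0 0).2 with hk
      have hk1 : 1 ≤ k := scanB_k_pos rest 0 0 hr
      have hrp : 0 < rest.length := List.length_pos_iff.mpr hr
      have hdrop : (rest.drop k).length ≤ m := by simp [List.length_drop]; omega
      have hiff := checkCorrectA_iff rest hr
      rw [huv]
      by_cases hcc : checkCorrectA (rest.take k) = true
      · rw [if_pos (hiff.mp hcc)]
        simp only [hcc]
        rw [ih _ hdrop]
        simp [List.append_assoc, ← hk]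
      · rw [if_neg (fun h => hcc (hiff.mpr h))]
        simp only [hcc]
        rw [ih _ hdrop]
        simp [List.append_assoc, ← hk]
theorem changeListA_eq_goB (l : List Char) : changeListA l = goB l [] [] := by
  rw [goB_eq_aux l.length l (Nat.le_refl _) [] []]
  simp

-- ===== VERDICT (by name: the statement is the Claim_ definition above) =====
theorem change_correct_spec : Claim_equal_change_correct := by
  intro string _
  unfold Spec_change_correct change_correct change_correct_alt
  rw [changeListA_eq_goB]
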